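-- pv_equiv track=rewrite | github.com/Junha7777/Online-Judge | Python/백준/Bronze/32710. 구구단표/구구단표.py | f
-- ===== SOURCE A (Python) =====
-- def f(n):
--     s = set()
--     for i in range(2, 10):
--         s.add(i)
--         for j in range(1, 10):
--             s.add(j)
--             s.add(i * j)
--     return 1 if n in s else 0
-- ===== SOURCE B (Python) =====
-- def f(n):
--     if n in range(1, 10):
--         return 1
--     for d in range(2, 10):
--         if n % d == 0 and 1 <= n // d <= 9:
--             return 1
--     return 0
-- ===== Notes on version B (the rewrite author's own statement) =====
-- stated objective: simpler
-- what changed: B tests membership in the multiplication table by divisibility (a divisor d in 2..9 with cofactor n//d in 1..9) instead of enumerating every table product into a set and looking n up.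
import Mathlib
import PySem

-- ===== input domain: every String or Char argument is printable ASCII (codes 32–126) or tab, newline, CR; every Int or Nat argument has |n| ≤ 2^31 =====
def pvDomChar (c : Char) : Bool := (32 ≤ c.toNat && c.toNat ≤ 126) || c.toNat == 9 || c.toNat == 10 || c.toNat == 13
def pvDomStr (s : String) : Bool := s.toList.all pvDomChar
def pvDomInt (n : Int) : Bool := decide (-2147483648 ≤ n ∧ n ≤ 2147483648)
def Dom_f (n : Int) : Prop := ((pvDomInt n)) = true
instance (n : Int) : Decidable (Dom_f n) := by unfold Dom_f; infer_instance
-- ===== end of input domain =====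

-- B replaces A's enumeration of every table product into a set by a direct
-- divisibility test (a divisor d in 2..9 with cofactor n // d in 1..9); objective: simpler.

-- ===== PORT A =====
def f (n : Int) : Int :=
  let s : PySem.Set Int :=
    (PySem.List.pyRange 2 10 1).foldl (fun s i =>
      (PySem.List.pyRange 1 10 1).foldl (fun s j =>
        PySem.Set.add (PySem.Set.add s j) (i * j)) (PySem.Set.add s i)) PySem.Set.empty
  if PySem.Set.contains s n then 1 else 0

-- ===== PORT B =====
def f_alt (n : Int) : Int :=
  if n ∈ PySem.List.pyRange 1 10 1 then 1
  else if (PySem.List.pyRange 2 10 1).any (fun d =>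
      PySem.Int.mod n d == 0 && decide (1 ≤ PySem.Int.floordiv n d) && decide (PySem.Int.floordiv n d ≤ 9)) then 1
  else 0

-- ===== PRECONDITION & SPEC =====
def Spec_f (n : Int) (out : Int) : Prop := out = f_alt n
instance (n : Int) (out : Int) : Decidable (Spec_f n out) := by unfold Spec_f; infer_instance

-- ===== CLAIM (what is proved, stated in full; the proofs are below) =====
def Claim_equal_f : Prop := ∀ (n : Int), Dom_f n → Spec_f n (f n)

-- ===== LEMMAS AND PROOFS =====

-- the set A builds, evaluated to its literal element list
set_option maxRecDepth 4000 in
theorem f_eval (n : Int) :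
    f n = if n ∈ ([2, 1, 4, 3, 6, 8, 5, 10, 12, 7, 14, 16, 9, 18, 15, 21, 24, 27, 20, 28,
      32, 36, 25, 30, 35, 40, 45, 42, 48, 54, 49, 56, 63, 64, 72, 81] : List Int) then 1 else 0 := by
  have h : ((PySem.List.pyRange 2 10 1).foldl (fun s i =>
      (PySem.List.pyRange 1 10 1).foldl (fun s j =>
        PySem.Set.add (PySem.Set.add s j) (i * j)) (PySem.Set.add s i)) PySem.Set.empty : PySem.Set Int)
      = [2, 1, 4, 3, 6, 8, 5, 10, 12, 7, 14, 16, 9, 18, 15, 21, 24, 27, 20, 28,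
      32, 36, 25, 30, 35, 40, 45, 42, 48, 54, 49, 56, 63, 64, 72, 81] := by decide
  unfold f
  rw [h]
  simp [PySem.Set.contains]

-- B, evaluated to explicit arithmetic conditions on n
set_option maxHeartbeats 1000000 in
theorem f_alt_eval (n : Int) :
    f_alt n = if 1 ≤ n ∧ n < 10 then 1
      else if (n % 2 = 0 ∧ 1 ≤ n / 2 ∧ n / 2 ≤ 9) ∨ (n % 3 = 0 ∧ 1 ≤ n / 3 ∧ n / 3 ≤ 9) ∨
        (n % 4 = 0 ∧ 1 ≤ n / 4 ∧ n / 4 ≤ 9) ∨ (n % 5 = 0 ∧ 1 ≤ n / 5 ∧ n / 5 ≤ 9) ∨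
        (n % 6 = 0 ∧ 1 ≤ n / 6 ∧ n / 6 ≤ 9) ∨ (n % 7 = 0 ∧ 1 ≤ n / 7 ∧ n / 7 ≤ 9) ∨
        (n % 8 = 0 ∧ 1 ≤ n / 8 ∧ n / 8 ≤ 9) ∨ (n % 9 = 0 ∧ 1 ≤ n / 9 ∧ n / 9 ≤ 9)
      then 1 else 0 := by
  have hr2 : PySem.List.pyRange 2 10 1 = [2, 3, 4, 5, 6, 7, 8, 9] := by decide
  have hm : ∀ d : Int, 0 < d → PySem.Int.mod n d = n % d :=
    fun d hd => PySem.Int.mod_eq_emod_of_pos hd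
  have hf : ∀ d : Int, 0 < d → PySem.Int.floordiv n d = n / d :=
    fun d hd => PySem.Int.floordiv_eq_ediv_of_pos hd
  simp only [f_alt, hr2, List.any_cons, List.any_nil,
    hm 2 (by norm_num), hm 3 (by norm_num), hm 4 (by norm_num), hm 5 (by norm_num),
    hm 6 (by norm_num), hm 7 (by norm_num), hm 8 (by norm_num), hm 9 (by norm_num),
    hf 2 (by norm_num), hf 3 (by norm_num), hf 4 (by norm_num), hf 5 (by norm_num),
    hf 6 (by norm_num), hf 7 (by norm_num), hf 8 (by norm_num), hf 9 (by norm_num),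
    PySem.List.mem_pyRange_one, Bool.or_eq_true, Bool.and_eq_true, beq_iff_eq,
    decide_eq_true_eq, Bool.false_eq_true, and_assoc, or_false]

-- membership in the table list ↔ single digit or divisor/cofactor factorisation
set_option maxHeartbeats 1000000 in
theorem table_iff (n : Int) :
    n ∈ ([2, 1, 4, 3, 6, 8, 5, 10, 12, 7, 14, 16, 9, 18, 15, 21, 24, 27, 20, 28,
      32, 36, 25, 30, 35, 40, 45, 42, 48, 54, 49, 56, 63, 64, 72, 81] : List Int) ↔
    (1 ≤ n ∧ n < 10) ∨
      ((n % 2 = 0 ∧ 1 ≤ n / 2 ∧ n / 2 ≤ 9) ∨ (n % 3 = 0 ∧ 1 ≤ n / 3 ∧ n / 3 ≤ 9) ∨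
        (n % 4 = 0 ∧ 1 ≤ n / 4 ∧ n / 4 ≤ 9) ∨ (n % 5 = 0 ∧ 1 ≤ n / 5 ∧ n / 5 ≤ 9) ∨
        (n % 6 = 0 ∧ 1 ≤ n / 6 ∧ n / 6 ≤ 9) ∨ (n % 7 = 0 ∧ 1 ≤ n / 7 ∧ n / 7 ≤ 9) ∨
        (n % 8 = 0 ∧ 1 ≤ n / 8 ∧ n / 8 ≤ 9) ∨ (n % 9 = 0 ∧ 1 ≤ n / 9 ∧ n / 9 ≤ 9)) := by
  simp only [List.mem_cons, List.not_mem_nil, or_false]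
  constructor
  · rintro (h|h|h|h|h|h|h|h|h|h|h|h|h|h|h|h|h|h|h|h|h|h|h|h|h|h|h|h|h|h|h|h|h|h|h|h) <;> omega
  · rintro (h|h|h|h|h|h|h|h|h) <;> omega

-- ===== VERDICT (by name: the statement is the Claim_ definition above) =====
theorem f_spec : Claim_equal_f := by
  intro n _
  show f n = f_alt n
  rw [f_eval, f_alt_eval]
  by_cases hmem : n ∈ ([2, 1, 4, 3, 6, 8, 5, 10, 12, 7, 14, 16, 9, 18, 15, 21, 24, 27, 20, 28,
      32, 36, 25, 30, 35, 40, 45, 42, 48, 54, 49, 56, 63, 64, 72, 81] : List Int)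
  · rw [if_pos hmem]
    rcases (table_iff n).mp hmem with hA | hR
    · rw [if_pos hA]
    · by_cases hA : 1 ≤ n ∧ n < 10
      · rw [if_pos hA]
      · rw [if_neg hA, if_pos hR]
  · rw [if_neg hmem]
    have hAR := fun h => hmem ((table_iff n).mpr h)
    rw [if_neg (fun hA => hAR (Or.inl hA)), if_neg (fun hR => hAR (Or.inr hR))]
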